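-- pv_equiv track=rewrite | github.com/sharmaji27/InterviewBit-Problems | Dynamic Programming/Ways to color a 3xN Board.py | solve
-- ===== SOURCE A (Python) =====
-- def solve(A):
--     color2 = 12
--     color3 = 24
--     temp = 0
--
--     for i in range(1,A):
--         temp = color3
--         color3 = (10*color2 + 11*color3)%1000000007
--         color2 = (7*color2 + 5*temp)%1000000007
--
--     return (color3+color2)%1000000007
-- ===== SOURCE B (Python) =====
-- def solve(A):
--     M = 1000000007
--
--     def mul(X, Y):
--         a, b, c, d = X
--         e, f, g, h = Y
--         return ((a*e + b*g) % M, (a*f + b*h) % M,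
--                 (c*e + d*g) % M, (c*f + d*h) % M)
--
--     n = A - 1 if A > 1 else 0          # number of recurrence steps
--     R = (1, 0, 0, 1)                   # identity
--     P = (11, 10, 5, 7)                 # step matrix acting on (color3, color2)
--     while n:
--         if n & 1:
--             R = mul(R, P)
--         P = mul(P, P)
--         n >>= 1
--     c3 = (R[0]*24 + R[1]*12) % M
--     c2 = (R[2]*24 + R[3]*12) % M
--     return (c3 + c2) % M
-- ===== Notes on version B (the rewrite author's own statement) =====
-- stated objective: faster
-- what changed: Replaces the step-by-step linear-recurrence loop with binary exponentiation of the 2x2 step matrix mod 1e9+7 applied to the initial state vector.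
import Mathlib
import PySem

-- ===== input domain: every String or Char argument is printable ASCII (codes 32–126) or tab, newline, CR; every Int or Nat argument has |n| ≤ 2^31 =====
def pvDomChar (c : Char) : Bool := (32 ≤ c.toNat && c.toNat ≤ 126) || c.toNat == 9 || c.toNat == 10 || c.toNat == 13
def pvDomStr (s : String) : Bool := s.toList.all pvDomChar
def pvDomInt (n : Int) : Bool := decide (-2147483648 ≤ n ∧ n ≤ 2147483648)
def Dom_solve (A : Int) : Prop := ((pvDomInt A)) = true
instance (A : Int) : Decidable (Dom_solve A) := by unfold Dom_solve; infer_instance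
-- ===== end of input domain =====

-- B replaces A's step-by-step recurrence loop (O(A) steps) by binary exponentiation of the 2x2 step matrix mod 1e9+7 (O(log A) steps).

-- ===== PORT A =====
def solve (A : Int) : Int :=
  let s := (PySem.List.pyRange 1 A 1).foldl
    (fun (st : Int × Int) _ =>
      let color2 := st.1
      let color3 := st.2
      let temp := color3
      let color3' := (10*color2 + 11*color3) % 1000000007
      let color2' := (7*color2 + 5*temp) % 1000000007
      (color2', color3'))
    (12, 24)
  (s.2 + s.1) % 1000000007

-- ===== PORT B =====
-- 2x2 matrices as 4-tuples (row major); every product entry is reduced mod 1e9+7, as Source B's mul does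
def pvMul (X Y : Int × Int × Int × Int) : Int × Int × Int × Int :=
  ((X.1*Y.1 + X.2.1*Y.2.2.1) % 1000000007, (X.1*Y.2.1 + X.2.1*Y.2.2.2) % 1000000007,
   (X.2.2.1*Y.1 + X.2.2.2*Y.2.2.1) % 1000000007, (X.2.2.1*Y.2.1 + X.2.2.2*Y.2.2.2) % 1000000007)

-- Source B's while-loop over the bits of n (n & 1 = n % 2, n >> 1 = n / 2)
def pvPow (n : Nat) (R P : Int × Int × Int × Int) : Int × Int × Int × Int :=
  if n = 0 then R
  else pvPow (n / 2) (if n % 2 = 1 then pvMul R P else R) (pvMul P P)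
termination_by n
decreasing_by exact Nat.div_lt_self (Nat.pos_of_ne_zero (by assumption)) (by omega)

def solve_alt (A : Int) : Int :=
  let n : Nat := if A > 1 then (A - 1).toNat else 0
  let R := pvPow n (1, 0, 0, 1) (11, 10, 5, 7)
  let c3 := (R.1*24 + R.2.1*12) % 1000000007
  let c2 := (R.2.2.1*24 + R.2.2.2*12) % 1000000007
  (c3 + c2) % 1000000007

-- ===== PRECONDITION & SPEC =====
def Spec_solve (A : Int) (out : Int) : Prop := out = solve_alt A
instance (A : Int) (out : Int) : Decidable (Spec_solve A out) := by unfold Spec_solve; infer_instance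

-- ===== CLAIM (what is proved, stated in full; the proofs are below) =====
def Claim_equal_solve : Prop := ∀ (A : Int), Dom_solve A → Spec_solve A (solve A)

-- ===== LEMMAS AND PROOFS =====

-- casting Int arithmetic mod 1e9+7 into ZMod 1000000007
theorem pvCast (a : Int) : ((a % 1000000007 : Int) : ZMod 1000000007) = (a : ZMod 1000000007) := by
  have h := ZMod.intCast_mod a 1000000007
  norm_num at h
  exact h

theorem pvVal (a : Int) : a % 1000000007 = (((a : ZMod 1000000007)).val : Int) := by
  have h := ZMod.val_intCast (n := 1000000007) a
  push_cast at h
  exact h.symm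

-- interpretation of an Int 4-tuple as a ZMod matrix; the step matrix for the recurrence
def pvPhi (X : Int × Int × Int × Int) : Matrix (Fin 2) (Fin 2) (ZMod 1000000007) :=
  !![(X.1 : ZMod 1000000007), X.2.1; X.2.2.1, X.2.2.2]

def pvP : Matrix (Fin 2) (Fin 2) (ZMod 1000000007) := !![11, 10; 5, 7]

def pvVec : Fin 2 → ZMod 1000000007 := ![24, 12]   -- (color3, color2) at i = 1

theorem pvPhi_mul (X Y : Int × Int × Int × Int) : pvPhi (pvMul X Y) = pvPhi X * pvPhi Y := by
  simp only [pvPhi, pvMul, Matrix.mul_fin_two, pvCast]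
  push_cast
  rfl

theorem pvPow_phi (n : Nat) (R P : Int × Int × Int × Int) :
    pvPhi (pvPow n R P) = pvPhi R * (pvPhi P) ^ n := by
  induction n using Nat.strong_induction_on generalizing R P with
  | _ n ih =>
    rw [pvPow]
    by_cases h0 : n = 0
    · simp [h0]
    · simp only [h0, if_false]
      rw [ih (n / 2) (Nat.div_lt_self (Nat.pos_of_ne_zero h0) (by omega)), pvPhi_mul]
      have hP : (pvPhi P * pvPhi P) ^ (n / 2) = (pvPhi P) ^ (2 * (n / 2)) := by
        rw [pow_mul, sq]
      have hn : n = n % 2 + 2 * (n / 2) := by omega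
      have hpow : (pvPhi P) ^ n = (pvPhi P) ^ (n % 2) * (pvPhi P) ^ (2 * (n / 2)) := by
        conv_lhs => rw [hn]
        rw [pow_add]
      rcases Nat.mod_two_eq_zero_or_one n with h2 | h2
      · rw [h2, pow_zero, one_mul] at hpow
        rw [h2, if_neg (by omega : ¬ (0 : Nat) = 1), hP, ← hpow]
      · rw [h2, pow_one] at hpow
        rw [h2, if_pos rfl, pvPhi_mul, hP, mul_assoc, ← hpow]

-- a foldl that ignores the list elements is function iteration
theorem pvFoldl_iterate {α β : Type} (f : α → α) (l : List β) (init : α) :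
    l.foldl (fun st _ => f st) init = f^[l.length] init := by
  induction l generalizing init with
  | nil => rfl
  | cons x xs ih => simp [List.foldl_cons, ih, Function.iterate_succ_apply]

-- A's loop body
def pvStep (st : Int × Int) : Int × Int :=
  ((7*st.1 + 5*st.2) % 1000000007, (10*st.1 + 11*st.2) % 1000000007)

theorem pvMulVec (w : Fin 2 → ZMod 1000000007) :
    Matrix.mulVec pvP w = ![11 * w 0 + 10 * w 1, 5 * w 0 + 7 * w 1] := by
  funext i
  fin_cases i <;>
    simp [pvP, Matrix.mulVec, dotProduct, Fin.sum_univ_two]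

-- A's loop state after k steps is the val-pair (c2, c3) of pvP^k applied to (24, 12)
theorem pvState (k : Nat) :
    pvStep^[k] (12, 24) =
      ((((Matrix.mulVec (pvP ^ k) pvVec) 1).val : Int), (((Matrix.mulVec (pvP ^ k) pvVec) 0).val : Int)) := by
  induction k with
  | zero =>
    simp only [Function.iterate_zero, id_eq, pow_zero, Matrix.one_mulVec]
    have h1 : ((pvVec 1).val : Int) = 12 := by decide
    have h0 : ((pvVec 0).val : Int) = 24 := by decide
    rw [h0, h1]
  | succ k ih =>
    rw [Function.iterate_succ_apply', ih]
    have hw : Matrix.mulVec (pvP ^ (k + 1)) pvVec = Matrix.mulVec pvP (Matrix.mulVec (pvP ^ k) pvVec) := by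
      rw [Matrix.mulVec_mulVec, ← pow_succ']
    set w := Matrix.mulVec (pvP ^ k) pvVec with hwdef
    rw [hw, pvMulVec]
    simp only [pvStep, Matrix.cons_val_zero, Matrix.cons_val_one,
      Prod.mk.injEq]
    constructor
    · rw [pvVal (7 * ((w 1).val : Int) + 5 * ((w 0).val : Int))]
      congr 1
      push_cast
      simp only [ZMod.natCast_val, ZMod.cast_id]
      ring
    · rw [pvVal (10 * ((w 1).val : Int) + 11 * ((w 0).val : Int))]
      congr 1
      push_cast
      simp only [ZMod.natCast_val, ZMod.cast_id]
      ring

-- ===== VERDICT (by name: the statement is the Claim_ definition above) =====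
theorem solve_spec : Claim_equal_solve := by
  intro A _
  unfold Spec_solve
  set k : Nat := (A - 1).toNat with hk
  set w : Fin 2 → ZMod 1000000007 := Matrix.mulVec (pvP ^ k) pvVec with hwdef
  have hc : (((((w 0).val : Int) + ((w 1).val : Int)) : Int) : ZMod 1000000007) = w 0 + w 1 := by
    push_cast
    simp [ZMod.natCast_val, ZMod.cast_id]
  have hsum : (((w 0).val : Int) + ((w 1).val : Int)) % 1000000007 = ((w 0 + w 1).val : Int) := by
    rw [pvVal, hc]
  have hfold : (PySem.List.pyRange 1 A 1).foldl (fun st _ => pvStep st) (12, 24)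
      = (((w 1).val : Int), ((w 0).val : Int)) := by
    rw [pvFoldl_iterate, PySem.List.length_pyRange_one, ← hk, pvState, ← hwdef]
  have hA : solve A = ((w 0 + w 1).val : Int) := by
    show (((PySem.List.pyRange 1 A 1).foldl (fun st _ => pvStep st) (12, 24)).2 +
          ((PySem.List.pyRange 1 A 1).foldl (fun st _ => pvStep st) (12, 24)).1) % 1000000007 = _
    rw [hfold]
    exact hsum
  have hkalt : (if A > 1 then (A - 1).toNat else 0) = k := by
    rw [hk]; split <;> omega
  have hphiR : pvPhi (pvPow k (1, 0, 0, 1) (11, 10, 5, 7)) = pvP ^ k := by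
    rw [pvPow_phi]
    have h1 : pvPhi (1, 0, 0, 1) = 1 := by
      simp [pvPhi, Matrix.one_fin_two]
    have h2 : pvPhi (11, 10, 5, 7) = pvP := by
      simp [pvPhi, pvP]
    rw [h1, h2, one_mul]
  set R : Int × Int × Int × Int := pvPow k (1, 0, 0, 1) (11, 10, 5, 7) with hR
  have hq0 : (R.1 : ZMod 1000000007) = (pvP ^ k) 0 0 := by rw [← hphiR]; simp [pvPhi]
  have hq1 : (R.2.1 : ZMod 1000000007) = (pvP ^ k) 0 1 := by rw [← hphiR]; simp [pvPhi]
  have hq2 : (R.2.2.1 : ZMod 1000000007) = (pvP ^ k) 1 0 := by rw [← hphiR]; simp [pvPhi]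
  have hq3 : (R.2.2.2 : ZMod 1000000007) = (pvP ^ k) 1 1 := by rw [← hphiR]; simp [pvPhi]
  have hw0 : w 0 = (pvP ^ k) 0 0 * 24 + (pvP ^ k) 0 1 * 12 := by
    rw [hwdef]; simp [pvVec, Matrix.mulVec, dotProduct, Fin.sum_univ_two]
  have hw1 : w 1 = (pvP ^ k) 1 0 * 24 + (pvP ^ k) 1 1 * 12 := by
    rw [hwdef]; simp [pvVec, Matrix.mulVec, dotProduct, Fin.sum_univ_two]
  have e0 : (R.1 * 24 + R.2.1 * 12) % 1000000007 = ((w 0).val : Int) := by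
    rw [pvVal]
    congr 1
    push_cast
    rw [hq0, hq1, hw0]
  have e1 : (R.2.2.1 * 24 + R.2.2.2 * 12) % 1000000007 = ((w 1).val : Int) := by
    rw [pvVal]
    congr 1
    push_cast
    rw [hq2, hq3, hw1]
  have hB : solve_alt A = ((w 0 + w 1).val : Int) := by
    show (((pvPow (if A > 1 then (A - 1).toNat else 0) (1, 0, 0, 1) (11, 10, 5, 7)).1 * 24 +
           (pvPow (if A > 1 then (A - 1).toNat else 0) (1, 0, 0, 1) (11, 10, 5, 7)).2.1 * 12) % 1000000007 +
          ((pvPow (if A > 1 then (A - 1).toNat else 0) (1, 0, 0, 1) (11, 10, 5, 7)).2.2.1 * 24 +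
           (pvPow (if A > 1 then (A - 1).toNat else 0) (1, 0, 0, 1) (11, 10, 5, 7)).2.2.2 * 12) % 1000000007) % 1000000007 = _
    rw [hkalt, ← hR, e0, e1]
    exact hsum
  rw [hA, hB]
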